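-- pv_equiv track=rewrite | github.com/albecst/Fundamentos-de-programacion | Cuaderno 5/Ejs_guiados_5.py | suma_lista
-- ===== SOURCE A (Python) =====
-- def suma_lista(lista,posini,posfinal):
--     if len(lista) == 0:
--         resultado = 0
--     if len(lista) == 1:
--         resultado = lista[0]
--     if posini == posfinal:
--         resultado = lista[posini]
--     else:
--         resultado = lista[posini] + suma_lista(lista, posini+1, posfinal)
--     return resultado
-- ===== SOURCE B (Python) =====
-- def suma_lista(lista, posini, posfinal):
--     total = lista[posini]
--     i = posini
--     while i != posfinal:
--         i += 1
--         total += lista[i]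
--     return total
-- ===== Notes on version B (the rewrite author's own statement) =====
-- stated objective: simpler
-- what changed: Replaces the non-tail recursion (and its dead len==0/len==1 guards) with a plain iterative accumulator loop that indexes the same positions one by one.
import Mathlib
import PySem

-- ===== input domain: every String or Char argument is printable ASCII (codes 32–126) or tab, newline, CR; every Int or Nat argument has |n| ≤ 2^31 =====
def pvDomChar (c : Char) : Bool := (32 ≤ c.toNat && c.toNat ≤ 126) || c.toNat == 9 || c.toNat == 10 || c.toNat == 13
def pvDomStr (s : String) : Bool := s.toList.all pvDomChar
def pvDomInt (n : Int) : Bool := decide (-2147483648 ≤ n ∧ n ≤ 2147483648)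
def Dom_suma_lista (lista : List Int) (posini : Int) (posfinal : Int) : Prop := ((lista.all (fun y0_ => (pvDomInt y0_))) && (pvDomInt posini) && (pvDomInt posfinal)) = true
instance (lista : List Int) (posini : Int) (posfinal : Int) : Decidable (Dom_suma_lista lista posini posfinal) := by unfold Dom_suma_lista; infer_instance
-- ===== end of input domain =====

-- B replaces A's non-tail recursion (with its dead len==0/len==1 guards) by a plain
-- iterative accumulator loop over the same element-by-element indexing (objective: simpler).

-- ===== PORT A =====
-- Literal port of A's recursion.  The len==0/len==1 assignments in A are dead code
-- (the final if/else always reassigns `resultado`), so they do not appear in the value.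
-- Fuel makes the recursion structural; inside Pre_ the fuel (posfinal-posini).toNat+1
-- is exactly enough, so the 0-fuel branch is never reached there.
def sumaListaRec (lista : List Int) (posini posfinal : Int) : Nat → Int
  | 0 => 0
  | fuel + 1 =>
    if posini = posfinal then (PySem.List.pyGet? lista posini).getD 0
    else (PySem.List.pyGet? lista posini).getD 0 + sumaListaRec lista (posini + 1) posfinal fuel

def suma_lista (lista : List Int) (posini : Int) (posfinal : Int) : Int :=
  sumaListaRec lista posini posfinal ((posfinal - posini).toNat + 1)

-- ===== PORT B =====
-- Literal port of B's while loop: state (i, total), test i ≠ posfinal, then i += 1;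
-- total += lista[i].  Same fuel convention as above.
def sumaListaLoop (lista : List Int) (posfinal : Int) : Int → Int → Nat → Int
  | _, total, 0 => total
  | i, total, fuel + 1 =>
    if i = posfinal then total
    else sumaListaLoop lista posfinal (i + 1) (total + (PySem.List.pyGet? lista (i + 1)).getD 0) fuel

def suma_lista_alt (lista : List Int) (posini : Int) (posfinal : Int) : Int :=
  sumaListaLoop lista posfinal posini ((PySem.List.pyGet? lista posini).getD 0)
    ((posfinal - posini).toNat + 1)

-- ===== PRECONDITION & SPEC =====
-- Pre_ is exactly where Python A returns: otherwise the recursion hits an IndexError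
-- (posini > posfinal makes it run off the end of the list as well).
def Pre_suma_lista (lista : List Int) (posini : Int) (posfinal : Int) : Prop :=
  -(lista.length : Int) ≤ posini ∧ posini ≤ posfinal ∧ posfinal < lista.length
instance (lista : List Int) (posini : Int) (posfinal : Int) : Decidable (Pre_suma_lista lista posini posfinal) := by unfold Pre_suma_lista; infer_instance

def pvWitness_suma_lista : List Int × Int × Int := ([3, -1, 4, 1], 1, 3)

def Spec_suma_lista (lista : List Int) (posini : Int) (posfinal : Int) (out : Int) : Prop := out = suma_lista_alt lista posini posfinal
instance (lista : List Int) (posini : Int) (posfinal : Int) (out : Int) : Decidable (Spec_suma_lista lista posini posfinal out) := by unfold Spec_suma_lista; infer_instance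

-- ===== CLAIM (what is proved, stated in full; the proofs are below) =====
def Claim_equal_suma_lista : Prop := ∀ (lista : List Int) (posini : Int) (posfinal : Int), Dom_suma_lista lista posini posfinal → Pre_suma_lista lista posini posfinal → Spec_suma_lista lista posini posfinal (suma_lista lista posini posfinal)

-- ===== LEMMAS AND PROOFS =====

-- the value Python's lista[i] yields (total stand-in; Pre_ keeps i in range).
def pvGetD (lista : List Int) (i : Int) : Int := (PySem.List.pyGet? lista i).getD 0

-- A's recursion over a gap of exactly k steps, with any sufficient fuel.
theorem sumaListaRec_eq_sum (lista : List Int) :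
    ∀ (k : Nat) (i : Int) (fuel : Nat), k < fuel →
      sumaListaRec lista i (i + k) fuel
        = ∑ j ∈ Finset.range (k + 1), pvGetD lista (i + j) := by
  intro k
  induction k with
  | zero =>
    intro i fuel hf
    match fuel, hf with
    | f + 1, _ => simp [sumaListaRec, pvGetD]
  | succ k ih =>
    intro i fuel hf
    match fuel, hf with
    | f + 1, hf =>
      have hstep : sumaListaRec lista i (i + ((k : Nat) + 1 : Nat)) (f + 1)
          = pvGetD lista i + sumaListaRec lista (i + 1) ((i + 1) + (k : Int)) f := by
        simp only [sumaListaRec, pvGetD]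
        rw [if_neg (by push_cast; omega)]
        congr 1
        push_cast; ring_nf
      rw [hstep, ih (i + 1) f (by omega)]
      rw [Finset.sum_range_succ' (fun j => pvGetD lista (i + (j : Int))) (k + 1)]
      have hcong : ∀ j ∈ Finset.range (k + 1),
          pvGetD lista ((i + 1) + (j : Int)) = pvGetD lista (i + ((j : Nat) + 1 : Nat)) := by
        intro j _
        congr 1
        push_cast; ring_nf
      rw [Finset.sum_congr rfl hcong]
      push_cast
      ring_nf

-- B's loop with accumulator `total`, gap of exactly k remaining steps.
theorem sumaListaLoop_eq_sum (lista : List Int) :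
    ∀ (k : Nat) (i total : Int) (fuel : Nat), k < fuel →
      sumaListaLoop lista (i + k) i total fuel
        = total + ∑ j ∈ Finset.range k, pvGetD lista (i + 1 + j) := by
  intro k
  induction k with
  | zero =>
    intro i total fuel hf
    match fuel, hf with
    | f + 1, _ => simp [sumaListaLoop]
  | succ k ih =>
    intro i total fuel hf
    match fuel, hf with
    | f + 1, hf =>
      have hstep : sumaListaLoop lista (i + ((k : Nat) + 1 : Nat)) i total (f + 1)
          = sumaListaLoop lista ((i + 1) + (k : Int)) (i + 1) (total + pvGetD lista (i + 1)) f := by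
        simp only [sumaListaLoop, pvGetD]
        rw [if_neg (by push_cast; omega)]
        congr 1
        push_cast; ring_nf
      rw [hstep, ih (i + 1) _ f (by omega)]
      rw [Finset.sum_range_succ' (fun j => pvGetD lista (i + 1 + (j : Int))) k]
      have hcong : ∀ j ∈ Finset.range k,
          pvGetD lista ((i + 1) + 1 + (j : Int)) = pvGetD lista (i + 1 + ((j : Nat) + 1 : Nat)) := by
        intro j _
        congr 1
        push_cast; ring_nf
      rw [Finset.sum_congr rfl hcong]
      push_cast
      ring_nf

theorem suma_lista_spec : Claim_equal_suma_lista := by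
  intro lista posini posfinal _ hpre
  obtain ⟨h1, h2, h3⟩ := hpre
  unfold Spec_suma_lista suma_lista suma_lista_alt
  set k : Nat := (posfinal - posini).toNat with hk
  have hpf : posfinal = posini + (k : Int) := by omega
  rw [hpf]
  rw [sumaListaRec_eq_sum lista k posini (k + 1) (by omega),
    sumaListaLoop_eq_sum lista k posini _ (k + 1) (by omega)]
  rw [Finset.sum_range_succ' (fun j => pvGetD lista (posini + (j : Int))) k]
  have hcong : ∀ j ∈ Finset.range k,
      pvGetD lista (posini + 1 + (j : Int)) = pvGetD lista (posini + ((j : Nat) + 1 : Nat)) := by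
    intro j _
    congr 1
    push_cast; ring
  rw [Finset.sum_congr rfl hcong]
  unfold pvGetD
  push_cast
  ring_nf
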